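-- pv_equiv track=rewrite | github.com/midstar/AoC | 2023/13A.py | solve
-- ===== SOURCE A (Python) =====
-- def horizontal_match(pattern):
--     for center in range(0, len(pattern) - 1):
--         offset = 1
--         valid_center = True
--         while (center - (offset - 1)) >= 0 and (center + offset) < len(pattern):
--             if pattern[center - (offset - 1)] != pattern[center + offset]:
--                 valid_center = False
--                 break
--             offset += 1
--         if valid_center:
--             return center + 1
--     return 0
--
-- def transpose(pattern):
--     new = []
--     for col in range(0, len(pattern[0])):
--         l = []
--         for row in range(0, len(pattern)):
--             l.append(pattern[row][col])
--         new.append(''.join(l))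
--     return new
--
-- def score(pattern):
--     # Horizontal
--     score = horizontal_match(pattern) * 100
--
--     # Vertical
--     score += horizontal_match(transpose(pattern))
--
--     return score
--
-- def solve(input):
--     lines = input.splitlines()
--     patterns = [[]]
--     for line in lines:
--         if line == '':
--             patterns.append([])
--         else:
--             patterns[-1].append(line)
--
--     result = 0
--     for pattern in patterns:
--         s = score(pattern)
--         result += s
--
--     return result
-- ===== SOURCE B (Python) =====
-- def horizontal_match(pattern):
--     for center in range(len(pattern) - 1):
--         top = pattern[:center + 1]
--         bottom = pattern[center + 1:]
--         n = min(len(top), len(bottom))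
--         if top[::-1][:n] == bottom[:n]:
--             return center + 1
--     return 0
--
-- def transpose(pattern):
--     new = []
--     for col in range(0, len(pattern[0])):
--         l = []
--         for row in range(0, len(pattern)):
--             l.append(pattern[row][col])
--         new.append(''.join(l))
--     return new
--
-- def score(pattern):
--     return horizontal_match(pattern) * 100 + horizontal_match(transpose(pattern))
--
-- def solve(input):
--     patterns = []
--     current = []
--     for line in input.splitlines():
--         if line == '':
--             patterns.append(current)
--             current = []
--         else:
--             current.append(line)
--     patterns.append(current)
--     return sum(score(p) for p in patterns)
-- ===== Notes on version B (the rewrite author's own statement) =====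
-- stated objective: simpler
-- what changed: horizontal_match's offset-expanding while-loop with a valid_center flag is replaced by a single reversed-slice prefix comparison per center (top[::-1][:n] == bottom[:n]), score becomes one expression, and solve accumulates each pattern in a separate current-buffer list summed with sum() instead of appending to patterns[-1] inside a growing list-of-lists; transpose is kept unchanged, so B raises IndexError exactly where A does (empty pattern, row shorter than the first row) and Pre_ excludes exactly those crashing inputs.
import Mathlib
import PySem

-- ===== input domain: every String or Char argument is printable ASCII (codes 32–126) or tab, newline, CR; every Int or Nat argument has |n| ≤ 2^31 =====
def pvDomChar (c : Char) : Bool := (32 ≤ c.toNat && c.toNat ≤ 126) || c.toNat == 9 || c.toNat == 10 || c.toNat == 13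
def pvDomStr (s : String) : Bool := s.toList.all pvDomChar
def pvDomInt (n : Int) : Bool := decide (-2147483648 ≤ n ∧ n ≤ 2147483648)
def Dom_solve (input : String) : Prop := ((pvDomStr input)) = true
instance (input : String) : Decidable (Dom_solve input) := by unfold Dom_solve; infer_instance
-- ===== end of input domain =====

-- B replaces A's offset-expanding while-loop mirror test by a reversed-slice prefix comparison and
-- accumulates patterns in a separate current-buffer instead of appending to patterns[-1]; objective: simpler.

-- ===== PORT A =====

-- the inner 'while' loop of horizontal_match; fuel only makes the loop total (it always
-- exits before pattern.length + 1 steps since center + offset grows past len(pattern))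
def loopA (pattern : List String) (center : Int) : Int → Nat → Bool
  | _, 0 => true
  | offset, fuel+1 =>
    if 0 ≤ center - (offset - 1) ∧ center + offset < (pattern.length : Int) then
      if PySem.List.pyGet? pattern (center - (offset - 1)) ≠ PySem.List.pyGet? pattern (center + offset) then
        false
      else loopA pattern center (offset + 1) fuel
    else true

-- 'for center in range(0, len(pattern)-1): … return center+1' with early return
def hmA_go (pattern : List String) : List Int → Int
  | [] => 0
  | c :: cs => if loopA pattern c 1 (pattern.length + 1) then c + 1 else hmA_go pattern cs

def horizontal_match_A (pattern : List String) : Int :=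
  hmA_go pattern (PySem.List.pyRange 0 ((pattern.length : Int) - 1) 1)

-- pattern[0] raises IndexError on an empty pattern and pattern[row][col] raises when a row is
-- shorter than row 0: both are excluded by Pre_solve, the defaults are never reached inside it.
-- ''.join of the single-character strings l is exactly String.ofList of the collected chars.
def transpose_A (pattern : List String) : List String :=
  (PySem.List.pyRange 0 (((PySem.List.pyGetD pattern 0 "").toList.length : Int)) 1).foldl
    (fun new col =>
      new ++ [String.ofList ((PySem.List.pyRange 0 ((pattern.length : Int)) 1).foldl
        (fun l row => l ++ [(PySem.Str.pyGet? (PySem.List.pyGetD pattern row "") col).getD ' ']) [])])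
    []

def score_A (pattern : List String) : Int :=
  horizontal_match_A pattern * 100 + horizontal_match_A (transpose_A pattern)

def solve (input : String) : Int :=
  let lines := PySem.Str.splitlines input
  let patterns := lines.foldl
    (fun ps line => if line = "" then ps ++ [([] : List String)]
                    else ps.dropLast ++ [ps.getLastD [] ++ [line]]) [[]]
  patterns.foldl (fun r p => r + score_A p) 0

-- ===== PORT B =====

-- 'for center in range(len(pattern)-1)': reversed-slice prefix comparison, early return
def mirror_B (pattern : List String) : List Int → Int
  | [] => 0
  | c :: cs =>
    let top := PySem.List.slice pattern none (some (c + 1))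
    let bottom := PySem.List.slice pattern (some (c + 1)) none
    let n : Int := min (top.length : Int) (bottom.length : Int)
    if PySem.List.slice ((PySem.List.slice? top none none (-1)).getD []) none (some n)
         = PySem.List.slice bottom none (some n)
    then c + 1 else mirror_B pattern cs

def horizontal_match_B (pattern : List String) : Int :=
  mirror_B pattern (PySem.List.pyRange 0 ((pattern.length : Int) - 1) 1)

-- B keeps A's transpose unchanged (same comments as on transpose_A apply)
def transpose_B (pattern : List String) : List String :=
  (PySem.List.pyRange 0 (((PySem.List.pyGetD pattern 0 "").toList.length : Int)) 1).foldl
    (fun new col =>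
      new ++ [String.ofList ((PySem.List.pyRange 0 ((pattern.length : Int)) 1).foldl
        (fun l row => l ++ [(PySem.Str.pyGet? (PySem.List.pyGetD pattern row "") col).getD ' ']) [])])
    []

def score_B (pattern : List String) : Int :=
  horizontal_match_B pattern * 100 + horizontal_match_B (transpose_B pattern)

def solve_alt (input : String) : Int :=
  let st := (PySem.Str.splitlines input).foldl
    (fun (st : List (List String) × List String) line =>
      if line = "" then (st.1 ++ [st.2], ([] : List String)) else (st.1, st.2 ++ [line]))
    ([], [])
  ((st.1 ++ [st.2]).map score_B).sum

-- ===== PRECONDITION & SPEC =====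

-- the blank-line grouping of the input lines (the patterns A forms), restated for Pre_
def preGroups : List String → List (List String)
  | [] => [[]]
  | l :: rest =>
    match preGroups rest with
    | [] => [[]]
    | g :: gs => if l = "" then [] :: g :: gs else (l :: g) :: gs

-- Pre_ excludes exactly the inputs on which the Python A raises IndexError: an empty pattern
-- (empty input, leading/trailing or doubled blank line) or a pattern row shorter than its first row.
def Pre_solve (input : String) : Prop :=
  ∀ g ∈ preGroups (PySem.Str.splitlines input),
    g ≠ [] ∧ ∀ r ∈ g, (g.headD "").toList.length ≤ r.toList.length

instance (input : String) : Decidable (Pre_solve input) := by unfold Pre_solve; infer_instance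

def pvWitness_solve : String := "#.#\n.#.\n.#.\n\n..\n##"

def Spec_solve (input : String) (out : Int) : Prop := out = solve_alt input
instance (input : String) (out : Int) : Decidable (Spec_solve input out) := by unfold Spec_solve; infer_instance

-- ===== CLAIM (what is proved, stated in full; the proofs are below) =====
def Claim_equal_solve : Prop := ∀ (input : String), Dom_solve input → Pre_solve input → Spec_solve input (solve input)

-- ===== LEMMAS AND PROOFS =====

-- the condition both mirror tests decide: all in-range pairs around the fold line agree
def mirrorSpec (pattern : List String) (c : Int) : Prop :=
  ∀ k < pattern.length, 0 ≤ c - (k : Int) ∧ c + 1 + k < (pattern.length : Int) →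
    PySem.List.pyGet? pattern (c - k) = PySem.List.pyGet? pattern (c + 1 + k)

lemma loopA_eq (pattern : List String) (c : Int) :
    ∀ (fuel j : Nat), pattern.length + 1 ≤ fuel + j →
      loopA pattern c ((j : Int) + 1) fuel =
        decide (∀ k : Nat, j ≤ k → k < pattern.length →
          0 ≤ c - (k : Int) ∧ c + 1 + k < (pattern.length : Int) →
          PySem.List.pyGet? pattern (c - k) = PySem.List.pyGet? pattern (c + 1 + k)) := by
  intro fuel
  induction fuel with
  | zero =>
    intro j hj
    simp only [loopA]
    symm
    simp only [decide_eq_true_eq]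
    intro k hk hklen
    omega
  | succ f ih =>
    intro j hj
    simp only [loopA]
    by_cases hcond : 0 ≤ c - ((j : Int) + 1 - 1) ∧ c + ((j : Int) + 1) < (pattern.length : Int)
    · rw [if_pos hcond]
      by_cases hne : PySem.List.pyGet? pattern (c - ((j : Int) + 1 - 1)) ≠ PySem.List.pyGet? pattern (c + ((j : Int) + 1))
      · rw [if_pos hne]
        symm
        simp only [decide_eq_false_iff_not]
        intro hall
        apply hne
        have hklen : j < pattern.length := by omega
        have := hall j (Nat.le_refl j) hklen (by constructor <;> omega)
        have e1 : c - ((j : Int) + 1 - 1) = c - (j : Int) := by ring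
        have e2 : c + ((j : Int) + 1) = c + 1 + (j : Int) := by ring
        rw [e1, e2]
        exact this
      · rw [if_neg hne]
        rw [not_not] at hne
        have hrec := ih (j + 1) (by omega)
        have ej : ((j + 1 : Nat) : Int) + 1 = (j : Int) + 1 + 1 := by push_cast; ring
        rw [ej] at hrec
        rw [hrec, decide_eq_decide]
        constructor
        · intro hall k hk hklen hrange
          rcases Nat.eq_or_lt_of_le hk with h | h
          · subst h
            have e1 : c - ((j : Int) + 1 - 1) = c - (j : Int) := by ring
            have e2 : c + ((j : Int) + 1) = c + 1 + (j : Int) := by ring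
            rw [e1, e2] at hne
            exact hne
          · exact hall k h hklen hrange
        · intro hall k hk hklen hrange
          exact hall k (by omega) hklen hrange
    · rw [if_neg hcond]
      symm
      simp only [decide_eq_true_eq]
      intro k hk hklen hrange
      exfalso
      apply hcond
      have : (j : Int) ≤ (k : Int) := by exact_mod_cast hk
      constructor <;> omega

lemma loopA_spec (pattern : List String) (c : Int) :
    loopA pattern c 1 (pattern.length + 1) = true ↔ mirrorSpec pattern c := by
  have h := loopA_eq pattern c (pattern.length + 1) 0 (by omega)
  have h0 : ((0 : Nat) : Int) + 1 = 1 := by norm_num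
  rw [h0] at h
  rw [h, decide_eq_true_eq]
  unfold mirrorSpec
  constructor
  · intro hall k hk hr; exact hall k (Nat.zero_le k) hk hr
  · intro hall k _ hk hr; exact hall k hk hr

lemma take_rev_eq_iff {α : Type} (xs : List α) (t m : Nat) (ht : t ≤ xs.length)
    (hm : m = min t (xs.length - t)) :
    ((xs.take t).reverse.take m = (xs.drop t).take m) ↔
      ∀ k < m, xs[t - 1 - k]? = xs[t + k]? := by
  have hlt : (xs.take t).length = t := by simp [List.length_take]; omega
  constructor
  · intro heq k hk
    have h1 : ((xs.take t).reverse.take m)[k]? = ((xs.drop t).take m)[k]? := by rw [heq]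
    rw [List.getElem?_take, List.getElem?_take, if_pos hk, if_pos hk,
        List.getElem?_reverse (by simp [hlt]; omega), List.getElem?_drop] at h1
    rw [hlt] at h1
    rw [List.getElem?_take, if_pos (by omega : t - 1 - k < t)] at h1
    exact h1
  · intro h
    apply List.ext_getElem?
    intro i
    by_cases hi : i < m
    · rw [List.getElem?_take, List.getElem?_take, if_pos hi, if_pos hi,
          List.getElem?_reverse (by simp [hlt]; omega), List.getElem?_drop]
      rw [hlt]
      rw [List.getElem?_take, if_pos (by omega : t - 1 - i < t)]
      exact h i hi
    · rw [List.getElem?_take, List.getElem?_take, if_neg hi, if_neg hi]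

lemma mirrorB_cond (pattern : List String) (c : Int) (hc : 0 ≤ c) :
    (PySem.List.slice ((PySem.List.slice? (PySem.List.slice pattern none (some (c + 1))) none none (-1)).getD []) none
        (some (min ((PySem.List.slice pattern none (some (c + 1))).length : Int)
                   ((PySem.List.slice pattern (some (c + 1)) none).length : Int)))
      = PySem.List.slice (PySem.List.slice pattern (some (c + 1)) none) none
        (some (min ((PySem.List.slice pattern none (some (c + 1))).length : Int)
                   ((PySem.List.slice pattern (some (c + 1)) none).length : Int))))
      ↔ mirrorSpec pattern c := by
  have h01 : (0:Int) ≤ c + 1 := by omega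
  rw [PySem.List.slice_to _ h01, PySem.List.slice_from _ h01,
      PySem.List.slice?_none_none_neg_one]
  simp only [Option.getD_some]
  have hn : (0:Int) ≤ min ((pattern.take (c+1).toNat).length : Int)
      ((pattern.drop (c+1).toNat).length : Int) := by
    apply le_min <;> exact Int.natCast_nonneg _
  rw [PySem.List.slice_to _ hn, PySem.List.slice_to _ hn]
  set t := (c + 1).toNat with htdef
  set L := pattern.length with hLdef
  by_cases hcase : t ≤ L
  · have hlen1 : (pattern.take t).length = t := by simp [List.length_take]; omega
    have hlen2 : (pattern.drop t).length = L - t := by simp [List.length_drop, hLdef]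
    rw [hlen1, hlen2]
    have hm : (min (t : Int) ((L - t : Nat) : Int)).toNat = min t (L - t) := by omega
    rw [hm, take_rev_eq_iff pattern t (min t (L - t)) hcase rfl]
    unfold mirrorSpec
    constructor
    · intro h k hkL hrange
      have e1 : c - (k : Int) = ((t - 1 - k : Nat) : Int) := by omega
      have e2 : c + 1 + (k : Int) = ((t + k : Nat) : Int) := by omega
      rw [e1, e2, PySem.List.pyGet?_natCast, PySem.List.pyGet?_natCast]
      exact h k (by omega)
    · intro h k hk
      have hrange : 0 ≤ c - (k : Int) ∧ c + 1 + (k : Int) < (L : Int) := by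
        constructor <;> omega
      have := h k (by omega) hrange
      have e1 : c - (k : Int) = ((t - 1 - k : Nat) : Int) := by omega
      have e2 : c + 1 + (k : Int) = ((t + k : Nat) : Int) := by omega
      rw [e1, e2, PySem.List.pyGet?_natCast, PySem.List.pyGet?_natCast] at this
      exact this
  · have hL : L ≤ t := by omega
    have hdrop : pattern.drop t = [] := List.drop_eq_nil_of_le hL
    rw [hdrop]
    simp only [List.length_nil]
    constructor
    · intro _ k hkL hrange
      exfalso
      omega
    · intro _
      simp

lemma hm_go_eq (pattern : List String) :
    ∀ cs : List Int, (∀ c ∈ cs, 0 ≤ c) → hmA_go pattern cs = mirror_B pattern cs := by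
  intro cs
  induction cs with
  | nil => intro _; rfl
  | cons c cs ih =>
    intro h
    have hc : 0 ≤ c := h c (List.mem_cons_self ..)
    simp only [hmA_go, mirror_B]
    by_cases hm : mirrorSpec pattern c
    · rw [if_pos ((loopA_spec pattern c).mpr hm), if_pos ((mirrorB_cond pattern c hc).mpr hm)]
    · rw [if_neg (fun hh => hm ((loopA_spec pattern c).mp hh)),
          if_neg (fun hh => hm ((mirrorB_cond pattern c hc).mp hh))]
      exact ih (fun x hx => h x (List.mem_cons_of_mem _ hx))

lemma hm_eq (pattern : List String) : horizontal_match_A pattern = horizontal_match_B pattern := by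
  unfold horizontal_match_A horizontal_match_B
  exact hm_go_eq pattern _ (fun c hc => ((PySem.List.mem_pyRange_one).mp hc).1)

lemma transpose_eq (pattern : List String) : transpose_A pattern = transpose_B pattern := rfl

lemma score_eq (pattern : List String) : score_A pattern = score_B pattern := by
  simp [score_A, score_B, hm_eq, transpose_eq]

lemma parse_eq (lines : List String) :
    ∀ (ps : List (List String)) (cur : List String),
      lines.foldl (fun ps line => if line = "" then ps ++ [([] : List String)]
                    else ps.dropLast ++ [ps.getLastD [] ++ [line]]) (ps ++ [cur])
      = (lines.foldl (fun (st : List (List String) × List String) line =>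
          if line = "" then (st.1 ++ [st.2], ([] : List String)) else (st.1, st.2 ++ [line]))
          (ps, cur)).1
        ++ [(lines.foldl (fun (st : List (List String) × List String) line =>
          if line = "" then (st.1 ++ [st.2], ([] : List String)) else (st.1, st.2 ++ [line]))
          (ps, cur)).2] := by
  induction lines with
  | nil => intro ps cur; rfl
  | cons l ls ih =>
    intro ps cur
    simp only [List.foldl_cons]
    by_cases h : l = ""
    · rw [if_pos h, if_pos h]
      have := ih (ps ++ [cur]) []
      simpa [List.append_assoc] using this
    · rw [if_neg h, if_neg h]
      rw [List.dropLast_concat, List.getLastD_concat]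
      exact ih ps (cur ++ [l])

-- ===== VERDICT (by name: the statement is the Claim_ definition above) =====
theorem solve_spec : Claim_equal_solve := by
  intro input _ _
  simp only [Spec_solve, solve, solve_alt]
  have hp := parse_eq (PySem.Str.splitlines input) [] []
  simp only [List.nil_append] at hp
  rw [hp, PySem.List.foldl_add (g := score_A)]
  rw [List.map_congr_left (fun p _ => score_eq p)]
  simp
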